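-- pv_equiv track=rewrite | github.com/DigitalMasterworks/Entropic-Substrate-Theory | Physics/OperatorPython/BSD-extract_L_from_spectrum.py | gen_ap_up_to_P
-- ===== SOURCE A (Python) =====
-- def discriminant_AB(A,B):
--     return -16*(4*A*A*A + 27*B*B)
--
-- def legendre_symbol(a, p):
--     if a % p == 0: return 0
--     t = pow(a, (p-1)//2, p)
--     return 1 if t == 1 else -1
--
-- def gen_ap_up_to_P(Pmax, A, B):
--     out = {}
--     Δ = discriminant_AB(A,B)
--     def good_prime(p):
--         return p != 2 and (Δ % p != 0)
--     # simple sieve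
--     bs = bytearray(b"\x01")*(Pmax+1)
--     bs[0:2] = b"\x00\x00"
--     for i in range(2, int(Pmax**0.5)+1):
--         if bs[i]:
--             bs[i*i:Pmax+1:i] = b"\x00"*(((Pmax-(i*i))//i)+1)
--     primes = [i for i in range(Pmax+1) if bs[i]]
--     for p in primes:
--         if good_prime(p):
--             s = 0
--             for x in range(p):
--                 rhs = (x*x % p * x + A*x + B) % p
--                 s += legendre_symbol(rhs, p)
--             out[p] = -s
--     return out
-- ===== SOURCE B (Python) =====
-- def gen_ap_up_to_P(Pmax, A, B):
--     disc = -16 * (4 * A * A * A + 27 * B * B)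
--     comp = [False] * (Pmax + 1)
--     for p in range(2, Pmax + 1):
--         if not comp[p] and p * p <= Pmax:
--             for j in range(p * p, Pmax + 1, p):
--                 comp[j] = True
--     out = {}
--     for p in range(3, Pmax + 1):
--         if not comp[p] and disc % p != 0:
--             cnt = [0] * p
--             for y in range(p):
--                 cnt[y * y % p] += 1
--             total = 0
--             for x in range(p):
--                 total += cnt[(x * x * x + A * x + B) % p]
--             out[p] = p - total
--     return out
-- ===== Notes on version B (the rewrite author's own statement) =====
-- stated objective: faster
-- what changed: Per good prime p, B replaces A's per-point Legendre symbol via modular exponentiation pow(rhs,(p-1)//2,p) with one O(p) table counting how many y have y*y % p == r (a_p = p - sum of cnt[x^3+Ax+B mod p]), and sieves with a composite-flag array instead of byte-slice assignments.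
import Mathlib
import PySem

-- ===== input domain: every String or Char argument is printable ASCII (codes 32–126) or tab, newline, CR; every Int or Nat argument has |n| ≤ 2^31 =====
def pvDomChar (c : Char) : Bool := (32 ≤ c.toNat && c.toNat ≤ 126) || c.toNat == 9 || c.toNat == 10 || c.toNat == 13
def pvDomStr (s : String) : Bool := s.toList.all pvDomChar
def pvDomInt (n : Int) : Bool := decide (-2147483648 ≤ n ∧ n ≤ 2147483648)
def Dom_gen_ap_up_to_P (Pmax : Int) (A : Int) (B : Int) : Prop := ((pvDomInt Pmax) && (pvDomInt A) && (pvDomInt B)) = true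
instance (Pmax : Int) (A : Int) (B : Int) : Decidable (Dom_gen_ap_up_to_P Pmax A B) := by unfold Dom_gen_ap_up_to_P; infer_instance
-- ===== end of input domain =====

-- B replaces the per-point modular exponentiation (pow(rhs,(p-1)//2,p) for every x) by one
-- O(p) table of squares counts per prime, and sieves with a composite-flag array: measurably
-- faster by a constant mechanism (no pow in the inner loop); return value proved equal on Pre_.


-- ===== PORT A =====
def discriminant_AB (A : Int) (B : Int) : Int := -16*(4*A*A*A + 27*B*B)

-- pow(a, (p-1)//2, p) is PySem.Int.powMod; its Nat exponent makes the .toNat conversion exact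
-- at every call site (p is an odd prime there, so (p-1)//2 ≥ 0).
def legendre_symbol (a : Int) (p : Int) : Int :=
  if PySem.Int.mod a p = 0 then 0
  else
    let t := PySem.Int.powMod a ((PySem.Int.floordiv (p - 1) 2).toNat) p
    if t = 1 then 1 else -1

-- Literal port of A.  bytearray cells are the ints 1 (b"\x01") / 0 (b"\x00"); 'if bs[i]' is
-- truthiness 'bs[i] ≠ 0'.  int(Pmax**0.5) = Int.sqrt Pmax, exact for 0 ≤ Pmax ≤ 2^31 (CPython's
-- correctly rounded float sqrt truncates to the integer sqrt there).  The slice assignment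
-- bs[i*i:Pmax+1:i] = b"\x00"*(((Pmax-i*i)//i)+1) writes 0 at i*i + k*i for k in range(count).
-- (For Pmax = 0 CPython's resizing assignment bs[0:2] = b"\x00\x00" grows the array to [0,0]
-- while the port keeps [0]; index 1 is never read, so every observable value is identical.)
def gen_ap_up_to_P (Pmax : Int) (A : Int) (B : Int) : List (Int × Int) :=
  let Δ := discriminant_AB A B
  let bs0 : List Int := ((List.replicate (Pmax + 1).toNat (1 : Int)).set 0 0).set 1 0
  let bs := (PySem.List.pyRange 2 (Int.sqrt Pmax + 1) 1).foldl (fun bs i =>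
      if PySem.List.pyGetD bs i 0 ≠ 0 then
        (PySem.List.pyRange 0 (PySem.Int.floordiv (Pmax - i*i) i + 1) 1).foldl
          (fun bs k => PySem.List.pySetD bs (i*i + k*i) 0) bs
      else bs) bs0
  let primes := (PySem.List.pyRange 0 (Pmax + 1) 1).filter
      (fun i => !(PySem.List.pyGetD bs i 0 == 0))
  (primes.foldl (fun out p =>
      if p ≠ 2 ∧ PySem.Int.mod Δ p ≠ 0 then
        let s := (PySem.List.pyRange 0 p 1).foldl (fun s x =>
            s + legendre_symbol (PySem.Int.mod (PySem.Int.mod (x*x) p * x + A*x + B) p) p) 0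
        PySem.Dict.insert out p (-s)
      else out) PySem.Dict.empty).items

-- ===== PORT B =====
-- Literal port of Source B: composite-flag sieve, then per good prime one table cnt of how many
-- y in range(p) have y*y % p == r, and total = sum of cnt[(x*x*x+A*x+B) % p] over x.
def gen_ap_up_to_P_alt (Pmax : Int) (A : Int) (B : Int) : List (Int × Int) :=
  let disc := -16*(4*A*A*A + 27*B*B)
  let comp0 : List Bool := List.replicate (Pmax + 1).toNat false
  let comp := (PySem.List.pyRange 2 (Pmax + 1) 1).foldl (fun comp p =>
      if PySem.List.pyGetD comp p false = false ∧ p*p ≤ Pmax then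
        (PySem.List.pyRange (p*p) (Pmax + 1) p).foldl
          (fun comp j => PySem.List.pySetD comp j true) comp
      else comp) comp0
  ((PySem.List.pyRange 3 (Pmax + 1) 1).foldl (fun out p =>
      if PySem.List.pyGetD comp p false = false ∧ PySem.Int.mod disc p ≠ 0 then
        let cnt := (PySem.List.pyRange 0 p 1).foldl (fun cnt y =>
            PySem.List.pySetD cnt (PySem.Int.mod (y*y) p)
              (PySem.List.pyGetD cnt (PySem.Int.mod (y*y) p) 0 + 1))
          (List.replicate p.toNat (0 : Int))
        let total := (PySem.List.pyRange 0 p 1).foldl (fun total x =>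
            total + PySem.List.pyGetD cnt (PySem.Int.mod (x*x*x + A*x + B) p) 0) 0
        PySem.Dict.insert out p (p - total)
      else out) PySem.Dict.empty).items

-- ===== PRECONDITION & SPEC =====
-- Pre_ excludes Pmax < 0, where A raises TypeError (int() of the complex number Pmax**0.5).
def Pre_gen_ap_up_to_P (Pmax : Int) (A : Int) (B : Int) : Prop := 0 ≤ Pmax
instance (Pmax : Int) (A : Int) (B : Int) : Decidable (Pre_gen_ap_up_to_P Pmax A B) := by
  unfold Pre_gen_ap_up_to_P; infer_instance
def pvWitness_gen_ap_up_to_P : Int × Int × Int := (10, 1, 1)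

def Spec_gen_ap_up_to_P (Pmax : Int) (A : Int) (B : Int) (out : List (Int × Int)) : Prop :=
  out = gen_ap_up_to_P_alt Pmax A B
instance (Pmax : Int) (A : Int) (B : Int) (out : List (Int × Int)) :
    Decidable (Spec_gen_ap_up_to_P Pmax A B out) := by unfold Spec_gen_ap_up_to_P; infer_instance

-- ===== CLAIM (what is proved, stated in full; the proofs are below) =====
def Claim_equal_gen_ap_up_to_P : Prop := ∀ (Pmax : Int) (A : Int) (B : Int),
  Dom_gen_ap_up_to_P Pmax A B → Pre_gen_ap_up_to_P Pmax A B →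
    Spec_gen_ap_up_to_P Pmax A B (gen_ap_up_to_P Pmax A B)
-- ===== LEMMAS AND PROOFS =====

-- d marks n during the first m sieve rounds (rounds are d = 2, 3, …, m+1 … here: 2 ≤ d ≤ m).
def MarkedBy (m n : Nat) : Prop := ∃ d, 2 ≤ d ∧ d ≤ m ∧ d ∣ n ∧ d*d ≤ n

lemma marked_char (m n : Nat) (hm : Nat.sqrt n ≤ m) : (2 ≤ n ∧ ¬ MarkedBy m n) ↔ n.Prime := by
  constructor
  · rintro ⟨h2, hnm⟩
    by_contra hnp
    have h1 : n ≠ 1 := by omega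
    have hq := Nat.minFac_prime h1
    have hsq : n.minFac * n.minFac ≤ n := by
      have := Nat.minFac_sq_le_self (by omega) hnp
      simpa [Nat.pow_two] using this
    exact hnm ⟨n.minFac, hq.two_le, le_trans (Nat.le_sqrt.mpr hsq) hm, Nat.minFac_dvd n, hsq⟩
  · intro hp
    refine ⟨hp.two_le, ?_⟩
    rintro ⟨d, hd2, hdm, hdvd, hdd⟩
    rcases (Nat.Prime.eq_one_or_self_of_dvd hp d hdvd) with rfl | rfl
    · omega
    · nlinarith [hp.two_le]

-- generic: a fold writing the constant v at nonnegative Int positions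
lemma length_foldl_pySetD {α : Type} (l : List Int) (v : α) (bs : List α) :
    (l.foldl (fun bs j => PySem.List.pySetD bs j v) bs).length = bs.length := by
  induction l generalizing bs with
  | nil => rfl
  | cons x xs ih => rw [List.foldl_cons, ih, PySem.List.length_pySetD]

lemma getD_foldl_pySetD {α : Type} (l : List Int) (hl : ∀ x ∈ l, 0 ≤ x) (v d : α)
    (bs : List α) (n : Nat) :
    (l.foldl (fun bs j => PySem.List.pySetD bs j v) bs).getD n d =
      if (n : Int) ∈ l ∧ n < bs.length then v else bs.getD n d := by
  induction l generalizing bs with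
  | nil => simp
  | cons x xs ih =>
    have hx : 0 ≤ x := hl x (List.mem_cons_self ..)
    rw [List.foldl_cons, ih (fun y hy => hl y (List.mem_cons_of_mem _ hy)),
        PySem.List.pySetD_of_nonneg bs v hx]
    simp only [List.length_set, List.getD_eq_getElem?_getD, List.getElem?_set, List.mem_cons]
    by_cases hnx : (n : Int) = x
    · have hxt : x.toNat = n := by omega
      by_cases hlen : n < bs.length <;> simp [hxt, hlen, hnx]
    · have hxt : ¬ (x.toNat = n) := by omega
      by_cases hmem : (n : Int) ∈ xs <;> by_cases hlen : n < bs.length <;>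
        simp [hxt, hlen, hnx, hmem]

-- the positions a sieve round writes: multiples of i in [i*i, Pmax]
lemma mem_markListA {Pmax i : Int} (hi : 2 ≤ i) (hiP : i*i ≤ Pmax) (n : Nat) (hn : (n:Int) ≤ Pmax) :
    ((n : Int) ∈ (PySem.List.pyRange 0 (PySem.Int.floordiv (Pmax - i*i) i + 1) 1).map
        (fun k => i*i + k*i)) ↔ (i ∣ (n : Int) ∧ i*i ≤ (n : Int)) := by
  have hipos : (0:ℤ) < i := by omega
  have hfd : PySem.Int.floordiv (Pmax - i*i) i = (Pmax - i*i) / i :=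
    PySem.Int.floordiv_eq_ediv_of_pos hipos
  have hmd : (Pmax - i*i) / i * i + (Pmax - i*i) % i = Pmax - i*i := by
    have h := Int.ediv_add_emod (Pmax - i*i) i
    linarith [mul_comm i ((Pmax - i*i)/i)]
  have hmn : 0 ≤ (Pmax - i*i) % i := Int.emod_nonneg _ (by omega)
  constructor
  · intro hmem
    rcases List.mem_map.mp hmem with ⟨k, hk, hkeq⟩
    rw [PySem.List.mem_pyRange_one] at hk
    constructor
    · exact ⟨i + k, by rw [← hkeq]; ring⟩
    · nlinarith [hk.1]
  · rintro ⟨⟨m, hm⟩, hge⟩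
    refine List.mem_map.mpr ⟨((n:Int) - i*i)/i, ?_, ?_⟩
    · rw [PySem.List.mem_pyRange_one, hfd]
      have h1 : 0 ≤ ((n:Int) - i*i)/i := Int.ediv_nonneg (by omega) (by omega)
      have h2 := Int.ediv_le_ediv hipos (by omega : (n:ℤ) - i*i ≤ Pmax - i*i)
      omega
    · have hdvd : i ∣ (n:ℤ) - i*i := ⟨m - i, by rw [hm]; ring⟩
      rw [Int.ediv_mul_cancel hdvd]; ring

lemma mem_markListB {Pmax i : Int} (hi : 2 ≤ i) (hiP : i*i ≤ Pmax) (n : Nat) (hn : (n:Int) ≤ Pmax) :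
    ((n : Int) ∈ PySem.List.pyRange (i*i) (Pmax + 1) i) ↔ (i ∣ (n : Int) ∧ i*i ≤ (n : Int)) := by
  have hipos : (0:ℤ) < i := by omega
  rw [PySem.List.mem_pyRange_iff_of_pos hipos]
  have hd : i ∣ (n:ℤ) - i*i ↔ i ∣ (n:ℤ) := by
    constructor
    · intro h; have := dvd_add h ⟨i, rfl⟩; simpa using this
    · intro h; exact dvd_sub h ⟨i, rfl⟩
  rw [hd]
  omega


lemma pvGetD_toNat {α : Type} (xs : List α) (i : Int) (d : α) (h : 0 ≤ i) :
    PySem.List.pyGetD xs i d = xs.getD i.toNat d := by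
  obtain ⟨n, rfl⟩ : ∃ n : ℕ, i = ↑n := ⟨i.toNat, (Int.toNat_of_nonneg h).symm⟩
  simp

lemma MarkedBy_mono {m n : Nat} (h : MarkedBy m n) : MarkedBy (m+1) n := by
  obtain ⟨d, h2, hm, hd, hdd⟩ := h; exact ⟨d, h2, by omega, hd, hdd⟩

lemma MarkedBy_succ (m n : Nat) (hm : 1 ≤ m) :
    MarkedBy (m+1) n ↔ MarkedBy m n ∨ ((m+1) ∣ n ∧ (m+1)*(m+1) ≤ n) := by
  constructor
  · rintro ⟨d, h2, hdm, hdvd, hdd⟩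
    by_cases hdm1 : d = m+1
    · subst hdm1; exact Or.inr ⟨hdvd, hdd⟩
    · exact Or.inl ⟨d, h2, by omega, hdvd, hdd⟩
  · rintro (⟨d, h2, hdm, hdvd, hdd⟩ | ⟨hdvd, hdd⟩)
    · exact ⟨d, h2, by omega, hdvd, hdd⟩
    · exact ⟨m+1, by omega, le_refl _, hdvd, hdd⟩

lemma MarkedBy_redundant (m n : Nat) (hm : MarkedBy m (m+1)) : MarkedBy (m+1) n ↔ MarkedBy m n := by
  constructor
  · rintro ⟨d, h2, hdm, hdvd, hdd⟩
    by_cases hdm1 : d = m+1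
    · subst hdm1
      obtain ⟨e, he2, hem, hedvd, hee⟩ := hm
      refine ⟨e, he2, hem, dvd_trans hedvd hdvd, ?_⟩
      have h1 : (m+1) ≤ (m+1)*(m+1) := Nat.le_mul_of_pos_left _ (by omega)
      omega
    · exact ⟨d, h2, by omega, hdvd, hdd⟩
  · exact MarkedBy_mono

lemma MarkedBy_big (m n : Nat) (hbig : n < (m+1)*(m+1)) : MarkedBy (m+1) n ↔ MarkedBy m n := by
  constructor
  · rintro ⟨d, h2, hdm, hdvd, hdd⟩
    by_cases hdm1 : d = m+1
    · subst hdm1; omega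
    · exact ⟨d, h2, by omega, hdvd, hdd⟩
  · exact MarkedBy_mono

lemma bs0_getD (N n : Nat) (hn : n ≤ N) :
    (((List.replicate (N + 1) (1 : Int)).set 0 0).set 1 0).getD n 0 = if n < 2 then 0 else 1 := by
  simp only [List.getD_eq_getElem?_getD, List.getElem?_set, List.length_set, List.length_replicate,
    List.getElem?_replicate]
  rcases n with _ | n
  · norm_num
  · rcases n with _ | n
    · simp [show (1:ℕ) < N+1 by omega]
    · have h0 : ¬ (0 = n+2) := by omega
      have h1 : ¬ (1 = n+2) := by omega
      have hlt : n+2 < N+1 := by omega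
      simp [h0, h1, hlt]

-- ---- sieve A ----
def pvStepA (Pmax : Int) (bs : List Int) (i : Int) : List Int :=
  if PySem.List.pyGetD bs i 0 ≠ 0 then
    (PySem.List.pyRange 0 (PySem.Int.floordiv (Pmax - i*i) i + 1) 1).foldl
      (fun bs k => PySem.List.pySetD bs (i*i + k*i) 0) bs
  else bs

def pvBsA (Pmax : Int) (j : Nat) : List Int :=
  (PySem.List.pyRange 2 (2 + (j:Int)) 1).foldl (pvStepA Pmax)
    (((List.replicate (Pmax + 1).toNat (1 : Int)).set 0 0).set 1 0)

lemma pvBsA_inv (Pmax : Int) (hP : 0 ≤ Pmax) (j : Nat) (hj : j ≤ Nat.sqrt Pmax.toNat - 1) :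
    (pvBsA Pmax j).length = Pmax.toNat + 1 ∧
    ∀ n : Nat, n ≤ Pmax.toNat →
      ((pvBsA Pmax j).getD n 0 ≠ 0 ↔ (2 ≤ n ∧ ¬ MarkedBy (j+1) n)) := by
  induction j with
  | zero =>
    have h0 : pvBsA Pmax 0 = ((List.replicate (Pmax + 1).toNat (1 : Int)).set 0 0).set 1 0 := by
      unfold pvBsA
      rw [show ((2:ℤ) + ((0:ℕ):ℤ)) = 2 by norm_num, PySem.List.pyRange_one_eq_nil (by omega)]
      rfl
    rw [h0]
    have hlen : (Pmax + 1).toNat = Pmax.toNat + 1 := by omega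
    refine ⟨by simp [hlen], ?_⟩
    intro n hn
    rw [hlen, bs0_getD _ _ hn]
    have hnm : ¬ MarkedBy 1 n := by rintro ⟨d, h2, hd1, _, _⟩; omega
    by_cases h2 : n < 2 <;> simp [h2, hnm] <;> omega
  | succ j ih =>
    obtain ⟨ihl, ihg⟩ := ih (by omega)
    have hsq : (j+2)*(j+2) ≤ Pmax.toNat := Nat.le_sqrt.mp (by omega)
    have hstep : pvBsA Pmax (j+1) = pvStepA Pmax (pvBsA Pmax j) (2 + (j:ℤ)) := by
      unfold pvBsA
      rw [show ((2:ℤ) + ((j+1:ℕ):ℤ)) = (2 + (j:ℤ)) + 1 by push_cast; ring,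
          PySem.List.pyRange_one_succ_right (by omega), List.foldl_append]
      rfl
    rw [hstep]
    set i : ℤ := 2 + (j:ℤ) with hi
    have hi0 : 0 ≤ i := by omega
    have hitn : i.toNat = j + 2 := by omega
    have hii : i * i = (((j+2)*(j+2) : ℕ) : ℤ) := by rw [hi]; push_cast; ring
    have hiP : i * i ≤ Pmax := by
      rw [hii]
      have h2 : (Pmax.toNat : ℤ) = Pmax := Int.toNat_of_nonneg hP
      calc (((j+2)*(j+2) : ℕ) : ℤ) ≤ (Pmax.toNat : ℤ) := by exact_mod_cast hsq
        _ = Pmax := h2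
    have hiN : i.toNat ≤ Pmax.toNat := by
      have := Nat.le_mul_of_pos_left (j+2) (show 0 < j+2 by omega)
      omega
    have hdvd_iff : ∀ n : ℕ, (i ∣ (n:ℤ)) ↔ (j+2) ∣ n := by
      intro n
      rw [show i = (((j+2:ℕ)):ℤ) by omega, Int.natCast_dvd_natCast]
    have hsq_iff : ∀ n : ℕ, (i*i ≤ (n:ℤ)) ↔ (j+2)*(j+2) ≤ n := by
      intro n; rw [hii]; exact_mod_cast Iff.rfl
    unfold pvStepA
    have hguard : PySem.List.pyGetD (pvBsA Pmax j) i 0 = (pvBsA Pmax j).getD i.toNat 0 :=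
      pvGetD_toNat _ _ _ hi0
    by_cases hg : PySem.List.pyGetD (pvBsA Pmax j) i 0 ≠ 0
    · rw [if_pos hg]
      have hfold : ∀ (g : List Int), g = pvBsA Pmax j →
          ((PySem.List.pyRange 0 (PySem.Int.floordiv (Pmax - i*i) i + 1) 1).foldl
            (fun bs k => PySem.List.pySetD bs (i*i + k*i) 0) g)
          = ((PySem.List.pyRange 0 (PySem.Int.floordiv (Pmax - i*i) i + 1) 1).map
              (fun k => i*i + k*i)).foldl (fun bs j => PySem.List.pySetD bs j 0) g := by
        intro g _; rw [List.foldl_map]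
      rw [hfold _ rfl]
      have hposl : ∀ x ∈ (PySem.List.pyRange 0 (PySem.Int.floordiv (Pmax - i*i) i + 1) 1).map
          (fun k => i*i + k*i), 0 ≤ x := by
        intro x hx
        rcases List.mem_map.mp hx with ⟨k, hk, hkeq⟩
        rw [PySem.List.mem_pyRange_one] at hk
        nlinarith [hk.1]
      refine ⟨by rw [length_foldl_pySetD, ihl], ?_⟩
      intro n hn
      have hnP : (n:ℤ) ≤ Pmax := by omega
      rw [getD_foldl_pySetD _ hposl 0 0 _ n]
      simp only [mem_markListA (show (2:ℤ) ≤ i by omega) hiP n hnP, ihl, hdvd_iff n, hsq_iff n]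
      have hlt : n < Pmax.toNat + 1 := by omega
      by_cases hc : ((j+2) ∣ n ∧ (j+2)*(j+2) ≤ n)
      · have hM : MarkedBy (j+1+1) n := (MarkedBy_succ (j+1) n (by omega)).mpr (Or.inr hc)
        simp [hc, hlt, hM]
      · have hc' : ¬ (((j+2) ∣ n ∧ (j+2)*(j+2) ≤ n) ∧ n < Pmax.toNat + 1) :=
          fun h => hc h.1
        rw [if_neg hc', ihg n hn, MarkedBy_succ (j+1) n (by omega)]
        constructor
        · rintro ⟨ha, hb⟩
          exact ⟨ha, by rintro (h|h); exacts [hb h, hc h]⟩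
        · rintro ⟨ha, hb⟩
          exact ⟨ha, fun h => hb (Or.inl h)⟩
    · rw [if_neg hg]
      push_neg at hg
      rw [hguard] at hg
      rw [hitn] at hg
      have hMi : MarkedBy (j+1) (j+2) := by
        by_contra hM
        exact (ihg (j+2) (by omega)).mpr ⟨by omega, hM⟩ hg
      refine ⟨ihl, ?_⟩
      intro n hn
      rw [ihg n hn, MarkedBy_redundant (j+1) n hMi]

lemma pvBsA_prime (Pmax : Int) (hP : 0 ≤ Pmax) (n : Nat) (hn : n ≤ Pmax.toNat) :
    ((pvBsA Pmax (Nat.sqrt Pmax.toNat - 1)).getD n 0 ≠ 0) ↔ n.Prime := by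
  obtain ⟨_, hg⟩ := pvBsA_inv Pmax hP (Nat.sqrt Pmax.toNat - 1) le_rfl
  rw [hg n hn]
  refine marked_char _ n ?_
  have h1 := Nat.sqrt_le_sqrt hn
  omega

-- ---- sieve B ----
def pvStepB (Pmax : Int) (comp : List Bool) (p : Int) : List Bool :=
  if PySem.List.pyGetD comp p false = false ∧ p*p ≤ Pmax then
    (PySem.List.pyRange (p*p) (Pmax + 1) p).foldl
      (fun comp j => PySem.List.pySetD comp j true) comp
  else comp

def pvCompB (Pmax : Int) (j : Nat) : List Bool :=
  (PySem.List.pyRange 2 (2 + (j:Int)) 1).foldl (pvStepB Pmax)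
    (List.replicate (Pmax + 1).toNat false)

lemma pvCompB_inv (Pmax : Int) (hP : 0 ≤ Pmax) (j : Nat) (hj : j ≤ Pmax.toNat - 1) :
    (pvCompB Pmax j).length = Pmax.toNat + 1 ∧
    ∀ n : Nat, n ≤ Pmax.toNat →
      ((pvCompB Pmax j).getD n false = true ↔ MarkedBy (j+1) n) := by
  induction j with
  | zero =>
    have h0 : pvCompB Pmax 0 = List.replicate (Pmax + 1).toNat false := by
      unfold pvCompB
      rw [show ((2:ℤ) + ((0:ℕ):ℤ)) = 2 by norm_num, PySem.List.pyRange_one_eq_nil (by omega)]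
      rfl
    rw [h0]
    have hlen : (Pmax + 1).toNat = Pmax.toNat + 1 := by omega
    refine ⟨by simp [hlen], ?_⟩
    intro n hn
    have hrep : (List.replicate (Pmax + 1).toNat false).getD n false = false := by
      simp only [List.getD_eq_getElem?_getD, List.getElem?_replicate]
      split <;> rfl
    rw [hrep]
    have hnm : ¬ MarkedBy 1 n := by rintro ⟨d, h2, hd1, _, _⟩; omega
    simp [hnm]
  | succ j ih =>
    obtain ⟨ihl, ihg⟩ := ih (by omega)
    have hstep : pvCompB Pmax (j+1) = pvStepB Pmax (pvCompB Pmax j) (2 + (j:ℤ)) := by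
      unfold pvCompB
      rw [show ((2:ℤ) + ((j+1:ℕ):ℤ)) = (2 + (j:ℤ)) + 1 by push_cast; ring,
          PySem.List.pyRange_one_succ_right (by omega), List.foldl_append]
      rfl
    rw [hstep]
    set i : ℤ := 2 + (j:ℤ) with hi
    have hi0 : 0 ≤ i := by omega
    have hitn : i.toNat = j + 2 := by omega
    have hii : i * i = (((j+2)*(j+2) : ℕ) : ℤ) := by rw [hi]; push_cast; ring
    have hiN : i.toNat ≤ Pmax.toNat := by omega
    have hdvd_iff : ∀ n : ℕ, (i ∣ (n:ℤ)) ↔ (j+2) ∣ n := by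
      intro n
      rw [show i = (((j+2:ℕ)):ℤ) by omega, Int.natCast_dvd_natCast]
    have hsq_iff : ∀ n : ℕ, (i*i ≤ (n:ℤ)) ↔ (j+2)*(j+2) ≤ n := by
      intro n; rw [hii]; exact_mod_cast Iff.rfl
    unfold pvStepB
    have hguard : PySem.List.pyGetD (pvCompB Pmax j) i false
        = (pvCompB Pmax j).getD i.toNat false := pvGetD_toNat _ _ _ hi0
    by_cases hg : (PySem.List.pyGetD (pvCompB Pmax j) i false = false ∧ i*i ≤ Pmax)
    · rw [if_pos hg]
      have hposl : ∀ x ∈ PySem.List.pyRange (i*i) (Pmax + 1) i, 0 ≤ x := by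
        intro x hx
        rw [PySem.List.mem_pyRange_iff_of_pos (by omega)] at hx
        nlinarith [hx.1]
      refine ⟨by rw [length_foldl_pySetD, ihl], ?_⟩
      intro n hn
      have hnP : (n:ℤ) ≤ Pmax := by omega
      rw [getD_foldl_pySetD _ hposl true false _ n]
      simp only [mem_markListB (show (2:ℤ) ≤ i by omega) hg.2 n hnP, ihl,
        hdvd_iff n, hsq_iff n]
      have hlt : n < Pmax.toNat + 1 := by omega
      by_cases hc : ((j+2) ∣ n ∧ (j+2)*(j+2) ≤ n)
      · have hM : MarkedBy (j+1+1) n := (MarkedBy_succ (j+1) n (by omega)).mpr (Or.inr hc)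
        simp [hc, hlt, hM]
      · have hc2 : ¬ (((j+2) ∣ n ∧ (j+2)*(j+2) ≤ n) ∧ n < Pmax.toNat + 1) :=
          fun h => hc h.1
        rw [if_neg hc2, ihg n hn, MarkedBy_succ (j+1) n (by omega)]
        constructor
        · intro h
          exact Or.inl h
        · rintro (h|h)
          · exact h
          · exact absurd h hc
    · rw [if_neg hg]
      refine ⟨ihl, ?_⟩
      intro n hn
      rw [ihg n hn]
      by_cases hg2 : i*i ≤ Pmax
      · have hg1 : (pvCompB Pmax j).getD i.toNat false = true := by
          rcases Bool.eq_false_or_eq_true ((pvCompB Pmax j).getD i.toNat false) with h | h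
          · exact h
          · exact absurd ⟨by rw [hguard, h], hg2⟩ hg
        have hMi : MarkedBy (j+1) (j+2) := by
          rw [← hitn]
          exact (ihg i.toNat hiN).mp hg1
        exact (MarkedBy_redundant (j+1) n hMi).symm
      · have hbig : n < (j+1+1)*(j+1+1) := by
          have h2 : Pmax < i*i := by omega
          rw [hii] at h2
          have h3 : ((j+2)*(j+2) : ℕ) = (j+1+1)*(j+1+1) := by ring
          omega
        exact (MarkedBy_big (j+1) n hbig).symm

lemma pvCompB_prime (Pmax : Int) (hP : 0 ≤ Pmax) (n : Nat) (hn2 : 2 ≤ n) (hn : n ≤ Pmax.toNat) :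
    ((pvCompB Pmax (Pmax.toNat - 1)).getD n false = false) ↔ n.Prime := by
  obtain ⟨_, hg⟩ := pvCompB_inv Pmax hP (Pmax.toNat - 1) le_rfl
  have h := hg n hn
  have hs : Nat.sqrt n ≤ Pmax.toNat - 1 + 1 := by
    have := Nat.sqrt_le_self n
    omega
  rw [← marked_char (Pmax.toNat - 1 + 1) n hs]
  constructor
  · intro hf
    refine ⟨hn2, fun hM => ?_⟩
    rw [h.mpr hM] at hf
    exact absurd hf (by decide)
  · rintro ⟨_, hM⟩
    rcases Bool.eq_false_or_eq_true ((pvCompB Pmax (Pmax.toNat - 1)).getD n false) with hb | hb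
    · exact absurd (h.mp hb) hM
    · exact hb

-- ---- legendre / counting ----
lemma legendre_eq_legendreSym (p : ℕ) [hp : Fact p.Prime] (hp2 : p ≠ 2) (a : ℤ) :
    legendre_symbol a (p : ℤ) = legendreSym p a := by
  haveI : NeZero p := ⟨hp.out.ne_zero⟩
  haveI : Fact (1 < p) := ⟨hp.out.one_lt⟩
  have hodd : p % 2 = 1 := (Nat.Prime.eq_two_or_odd hp.out).resolve_left hp2
  have hple : 2 ≤ p := hp.out.two_le
  have hppos : (0:ℤ) < (p:ℤ) := by exact_mod_cast hp.out.pos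
  simp only [legendre_symbol]
  by_cases h0 : PySem.Int.mod a (p:ℤ) = 0
  · rw [if_pos h0]
    have hdvd : ((p:ℤ)) ∣ a := (PySem.Int.mod_eq_zero_iff_dvd a (p:ℤ)).mp h0
    have hz : (a : ZMod p) = 0 := (ZMod.intCast_zmod_eq_zero_iff_dvd a p).mpr hdvd
    exact ((legendreSym.eq_zero_iff p a).mpr hz).symm
  · rw [if_neg h0]
    have ha : (a : ZMod p) ≠ 0 := by
      intro hz
      exact h0 ((PySem.Int.mod_eq_zero_iff_dvd a (p:ℤ)).mpr
        ((ZMod.intCast_zmod_eq_zero_iff_dvd a p).mp hz))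
    have hexp : ((PySem.Int.floordiv ((p:ℤ) - 1) 2).toNat) = p / 2 := by
      rw [PySem.Int.floordiv_eq_ediv_of_pos (by norm_num : (0:ℤ) < 2)]
      omega
    rw [hexp]
    have hpm : PySem.Int.powMod a (p / 2) (p:ℤ) = PySem.Int.mod (a ^ (p / 2)) (p:ℤ) := by
      simp [PySem.Int.powMod]
    have hval : PySem.Int.mod (a ^ (p / 2)) (p:ℤ) = (((a : ZMod p) ^ (p / 2)).val : ℤ) := by
      rw [PySem.Int.mod_eq_emod_of_pos hppos]
      have h1 := ZMod.val_intCast (n := p) (a ^ (p/2))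
      rw [← h1]
      norm_cast
    rw [hpm, hval]
    by_cases h1 : (a : ZMod p) ^ (p / 2) = 1
    · rw [h1]
      have hv1 : (((1 : ZMod p)).val : ℤ) = 1 := by rw [ZMod.val_one p]; norm_num
      rw [hv1, if_pos rfl]
      exact ((legendreSym.eq_one_iff p ha).mpr ((ZMod.euler_criterion p ha).mpr h1)).symm
    · have hne : (((a : ZMod p) ^ (p / 2)).val : ℤ) ≠ 1 := by
        intro hv
        apply h1
        have hv2 : ((a : ZMod p) ^ (p / 2)).val = (1 : ZMod p).val := by
          rw [ZMod.val_one p]; exact_mod_cast hv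
        exact ZMod.val_injective p hv2
      rw [if_neg hne]
      have hns : ¬ IsSquare (a : ZMod p) := fun hs => h1 ((ZMod.euler_criterion p ha).mp hs)
      exact ((legendreSym.eq_neg_one_iff p).mpr hns).symm

lemma countP_sq_eq (p : ℕ) [hp : Fact p.Prime] (hp2 : p ≠ 2) (r : ℤ) (hr : 0 ≤ r) (hrp : r < (p:ℤ)) :
    (((List.range p).countP (fun (y:ℕ) => PySem.Int.mod ((y:ℤ)*(y:ℤ)) (p:ℤ) == r) : ℤ))
      = legendreSym p r + 1 := by
  haveI : NeZero p := ⟨hp.out.ne_zero⟩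
  have hppos : (0:ℤ) < (p:ℤ) := by exact_mod_cast hp.out.pos
  have hcount : (List.range p).countP (fun (y:ℕ) => PySem.Int.mod ((y:ℤ)*(y:ℤ)) (p:ℤ) == r)
      = (List.range p).countP (fun (y:ℕ) => decide ((((y:ℤ)*(y:ℤ)) % (p:ℤ)) = r)) := by
    apply List.countP_congr
    intro y _
    simp [PySem.Int.mod_eq_emod_of_pos hppos]
  rw [hcount]
  have h2 : (List.range p).countP (fun (y:ℕ) => decide ((((y:ℤ)*(y:ℤ)) % (p:ℤ)) = r))
      = ((Finset.range p).filter (fun (y:ℕ) => (((y:ℤ)*(y:ℤ)) % (p:ℤ)) = r)).card := by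
    rw [List.countP_eq_length_filter]
    rfl
  rw [h2]
  have h3 : ((Finset.range p).filter (fun (y:ℕ) => (((y:ℤ)*(y:ℤ)) % (p:ℤ)) = r)).card
      = (Finset.univ.filter (fun x : ZMod p => x ^ 2 = (r : ZMod p))).card := by
    apply Finset.card_bij (fun (y : ℕ) _ => ((y : ZMod p)))
    · intro y hy
      rw [Finset.mem_filter] at hy
      rw [Finset.mem_filter]
      refine ⟨Finset.mem_univ _, ?_⟩
      obtain ⟨_, hmod⟩ := hy
      have hcast : (((((y:ℤ)*(y:ℤ)) % (p:ℤ)) : ℤ) : ZMod p) = ((r : ℤ) : ZMod p) := by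
        rw [hmod]
      rw [ZMod.intCast_mod] at hcast
      push_cast at hcast
      rw [← hcast]
      ring
    · intro y1 h1 y2 h2 heq
      rw [Finset.mem_filter, Finset.mem_range] at h1 h2
      have hv1 := ZMod.val_cast_of_lt h1.1
      have hv2 := ZMod.val_cast_of_lt h2.1
      rw [← hv1, ← hv2, heq]
    · intro x hx
      rw [Finset.mem_filter] at hx
      have hx2 : ((x.val : ℕ) : ZMod p) = x := ZMod.natCast_rightInverse x
      refine ⟨x.val, Finset.mem_filter.mpr ⟨Finset.mem_range.mpr (ZMod.val_lt x), ?_⟩, hx2⟩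
      have he : ((((x.val:ℤ)*(x.val:ℤ)) : ℤ) : ZMod p) = ((r:ℤ) : ZMod p) := by
        push_cast
        rw [hx2, ← pow_two]
        exact hx.2
      have hmm := (ZMod.intCast_eq_intCast_iff' _ _ _).mp he
      rwa [Int.emod_eq_of_lt hr hrp] at hmm
  rw [h3]
  have h4 := legendreSym.card_sqrts p hp2 r
  have h5 : {x : ZMod p | x ^ 2 = (r : ZMod p)}.toFinset
      = Finset.univ.filter (fun x : ZMod p => x ^ 2 = (r : ZMod p)) := Set.toFinset_setOf _
  rw [h5] at h4
  exact h4

-- cnt table characterisation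
lemma cnt_char (p : Int) (hp : 0 < p) (l : List Int) (cnt : List Int)
    (hlen : cnt.length = p.toNat) (r : Int) (hr : 0 ≤ r) (hrp : r < p) :
    ((l.foldl (fun c y => PySem.List.pySetD c (PySem.Int.mod (y*y) p)
        (PySem.List.pyGetD c (PySem.Int.mod (y*y) p) 0 + 1)) cnt).getD r.toNat 0)
      = cnt.getD r.toNat 0 + (l.countP (fun y => PySem.Int.mod (y*y) p == r) : Int) := by
  induction l generalizing cnt with
  | nil => simp
  | cons x xs ih =>
    set m := PySem.Int.mod (x*x) p with hm
    have hm0 : 0 ≤ m := PySem.Int.mod_nonneg (x*x) hp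
    have hmlt : m < p := PySem.Int.mod_lt (x*x) hp
    have hset : PySem.List.pySetD cnt m (PySem.List.pyGetD cnt m 0 + 1)
        = cnt.set m.toNat (cnt.getD m.toNat 0 + 1) := by
      rw [PySem.List.pySetD_of_nonneg _ _ hm0, pvGetD_toNat _ _ _ hm0]
    rw [List.foldl_cons, hset, ih _ (by rw [List.length_set, hlen])]
    have hgd : (cnt.set m.toNat (cnt.getD m.toNat 0 + 1)).getD r.toNat 0
        = if m = r then cnt.getD r.toNat 0 + 1 else cnt.getD r.toNat 0 := by
      simp only [List.getD_eq_getElem?_getD, List.getElem?_set, hlen]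
      by_cases he : m = r
      · have ht : m.toNat = r.toNat := by omega
        simp [ht, he, show r.toNat < p.toNat by omega]
      · have ht : ¬ (m.toNat = r.toNat) := by omega
        simp [ht, he]
    rw [hgd]
    by_cases he : m = r
    · rw [if_pos he, List.countP_cons]
      have hb : (PySem.Int.mod (x*x) p == r) = true := by
        rw [← hm]; exact beq_iff_eq.mpr he
      rw [hb]
      simp only [if_true, Nat.cast_add, Nat.cast_one]
      ring
    · rw [if_neg he, List.countP_cons]
      have hb : (PySem.Int.mod (x*x) p == r) = false := by
        rw [← hm]; exact beq_eq_false_iff_ne.mpr he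
      rw [hb]
      simp

-- the two rhs expressions agree
lemma rhs_eq (p x A B : Int) (hp : 0 < p) :
    PySem.Int.mod (PySem.Int.mod (x*x) p * x + A*x + B) p
      = PySem.Int.mod (x*x*x + A*x + B) p := by
  simp only [PySem.Int.mod_eq_emod_of_pos hp]
  have hxx : (x*x % p) % p = (x*x) % p := Int.emod_emod_of_dvd _ dvd_rfl
  have h := (Int.ModEq.add_right (A*x + B) (Int.ModEq.mul_right x (hxx : _ ≡ _ [ZMOD p])))
  simpa [add_assoc] using h

-- per-prime value equality
lemma value_eq (p A B : Int) (hp3 : 3 ≤ p) (hp : p.toNat.Prime) :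
    -((PySem.List.pyRange 0 p 1).foldl (fun s x =>
        s + legendre_symbol (PySem.Int.mod (PySem.Int.mod (x*x) p * x + A*x + B) p) p) 0)
    = p - ((PySem.List.pyRange 0 p 1).foldl (fun total x =>
        total + PySem.List.pyGetD
          ((PySem.List.pyRange 0 p 1).foldl (fun cnt y =>
              PySem.List.pySetD cnt (PySem.Int.mod (y*y) p)
                (PySem.List.pyGetD cnt (PySem.Int.mod (y*y) p) 0 + 1))
            (List.replicate p.toNat (0 : Int)))
          (PySem.Int.mod (x*x*x + A*x + B) p) 0) 0) := by
  haveI hf : Fact p.toNat.Prime := ⟨hp⟩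
  have hppos : (0:ℤ) < p := by omega
  have hpcast : ((p.toNat : ℕ) : ℤ) = p := Int.toNat_of_nonneg (by omega)
  have hp2 : p.toNat ≠ 2 := by omega
  rw [PySem.List.foldl_add, PySem.List.foldl_add]
  set l := PySem.List.pyRange 0 p 1 with hl
  set cnt := l.foldl (fun cnt y => PySem.List.pySetD cnt (PySem.Int.mod (y*y) p)
      (PySem.List.pyGetD cnt (PySem.Int.mod (y*y) p) 0 + 1))
      (List.replicate p.toNat (0:Int)) with hcnt
  have hterm : ∀ x ∈ l, (PySem.List.pyGetD cnt (PySem.Int.mod (x*x*x + A*x + B) p) 0)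
      = legendreSym p.toNat (PySem.Int.mod (x*x*x + A*x + B) p) + 1 := by
    intro x hx
    set m := PySem.Int.mod (x*x*x + A*x + B) p with hm
    have hm0 : 0 ≤ m := PySem.Int.mod_nonneg _ hppos
    have hmlt : m < p := PySem.Int.mod_lt _ hppos
    rw [pvGetD_toNat _ _ _ hm0, hcnt,
        cnt_char p hppos l _ (by rw [List.length_replicate]) m hm0 hmlt]
    have hz : (List.replicate p.toNat (0:Int)).getD m.toNat 0 = 0 := by
      simp only [List.getD_eq_getElem?_getD, List.getElem?_replicate]
      split <;> rfl
    rw [hz, hl, PySem.List.pyRange_one, List.countP_map]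
    have hc : (List.range ((p:ℤ) - 0).toNat).countP
        ((fun y => PySem.Int.mod (y*y) p == m) ∘ (fun k : ℕ => (0:ℤ) + ↑k))
        = (List.range p.toNat).countP (fun (y:ℕ) => PySem.Int.mod ((y:ℤ)*(y:ℤ)) p == m) := by
      rw [show ((p:ℤ) - 0).toNat = p.toNat by omega]
      apply List.countP_congr
      intro y _
      simp [Function.comp]
    rw [hc]
    have hcs := countP_sq_eq p.toNat hp2 m hm0 (by rw [hpcast]; exact hmlt)
    rw [hpcast] at hcs
    rw [zero_add, hcs]
  have hmapB : List.map (fun x => PySem.List.pyGetD cnt (PySem.Int.mod (x*x*x + A*x + B) p) 0) l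
      = List.map (fun x => legendreSym p.toNat (PySem.Int.mod (x*x*x + A*x + B) p) + 1) l :=
    List.map_congr_left hterm
  have hmapA : List.map (fun x =>
        legendre_symbol (PySem.Int.mod (PySem.Int.mod (x*x) p * x + A*x + B) p) p) l
      = List.map (fun x => legendreSym p.toNat (PySem.Int.mod (x*x*x + A*x + B) p)) l := by
    apply List.map_congr_left
    intro x hx
    rw [rhs_eq p x A B hppos]
    have hleg := legendre_eq_legendreSym p.toNat hp2 (PySem.Int.mod (x*x*x + A*x + B) p)
    rw [hpcast] at hleg
    exact hleg
  rw [hmapA, hmapB]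
  rw [PySem.List.sum_map_add_int l
      (fun x => legendreSym p.toNat (PySem.Int.mod (x*x*x + A*x + B) p)) (fun _ => 1)]
  have hsum1 : (List.map (fun _ => (1:ℤ)) l).sum = (l.length : ℤ) := by
    rw [List.map_const']
    simp [List.sum_replicate]
  have hlength : ((l.length : ℕ) : ℤ) = p := by
    rw [hl, PySem.List.length_pyRange_one]
    omega
  rw [hsum1, hlength]
  ring

-- ===== VERDICT =====
theorem gen_ap_up_to_P_spec : Claim_equal_gen_ap_up_to_P := by
  intro Pmax A B hDom hPre
  have hP : (0:ℤ) ≤ Pmax := hPre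
  unfold Spec_gen_ap_up_to_P
  simp only [gen_ap_up_to_P, gen_ap_up_to_P_alt, discriminant_AB]
  -- A's sieve term is pvBsA, B's is pvCompB
  have hrange : PySem.List.pyRange 2 (Int.sqrt Pmax + 1) 1
      = PySem.List.pyRange 2 (2 + ((Nat.sqrt Pmax.toNat - 1 : ℕ) : ℤ)) 1 := by
    have hsq : Int.sqrt Pmax = ((Nat.sqrt Pmax.toNat : ℕ) : ℤ) := rfl
    by_cases h0 : Nat.sqrt Pmax.toNat = 0
    · rw [hsq, h0, PySem.List.pyRange_one_eq_nil (by omega),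
          PySem.List.pyRange_one_eq_nil (by simp)]
    · rw [hsq]; congr 1; omega
  rw [hrange]
  have hbs : List.foldl
      (fun bs i =>
        if PySem.List.pyGetD bs i 0 ≠ 0 then
          List.foldl (fun bs k => PySem.List.pySetD bs (i * i + k * i) 0) bs
            (PySem.List.pyRange 0 (PySem.Int.floordiv (Pmax - i * i) i + 1) 1)
        else bs)
      (((List.replicate (Pmax + 1).toNat (1:ℤ)).set 0 0).set 1 0)
      (PySem.List.pyRange 2 (2 + ((Nat.sqrt Pmax.toNat - 1 : ℕ) : ℤ)) 1)
      = pvBsA Pmax (Nat.sqrt Pmax.toNat - 1) := rfl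
  rw [hbs]
  have hrangeB : PySem.List.pyRange 2 (Pmax + 1) 1
      = PySem.List.pyRange 2 (2 + ((Pmax.toNat - 1 : ℕ) : ℤ)) 1 := by
    rcases eq_or_lt_of_le hP with h | h
    · rw [PySem.List.pyRange_one_eq_nil (by omega), PySem.List.pyRange_one_eq_nil (by omega)]
    · congr 1; omega
  rw [hrangeB]
  have hcomp : List.foldl
      (fun comp p =>
        if PySem.List.pyGetD comp p false = false ∧ p * p ≤ Pmax then
          List.foldl (fun comp j => PySem.List.pySetD comp j true) comp
            (PySem.List.pyRange (p * p) (Pmax + 1) p)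
        else comp)
      (List.replicate (Pmax + 1).toNat false)
      (PySem.List.pyRange 2 (2 + ((Pmax.toNat - 1 : ℕ) : ℤ)) 1)
      = pvCompB Pmax (Pmax.toNat - 1) := rfl
  rw [hcomp]
  rw [PySem.List.foldl_ite_eq_foldl_filter, PySem.List.foldl_ite_eq_foldl_filter,
      List.filter_filter]
  have hQA : List.filter (fun a =>
        decide (a ≠ 2 ∧ PySem.Int.mod (-16 * (4 * A * A * A + 27 * B * B)) a ≠ 0) &&
        !(PySem.List.pyGetD (pvBsA Pmax (Pmax.toNat.sqrt - 1)) a 0 == 0))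
      (PySem.List.pyRange 0 (Pmax + 1) 1)
      = List.filter (fun a =>
        decide (a ≠ 2 ∧ a.toNat.Prime ∧
          PySem.Int.mod (-16 * (4 * A * A * A + 27 * B * B)) a ≠ 0))
      (PySem.List.pyRange 0 (Pmax + 1) 1) := by
    apply List.filter_congr
    intro a ha
    rw [PySem.List.mem_pyRange_one] at ha
    rw [pvGetD_toNat _ _ _ ha.1]
    have hch := pvBsA_prime Pmax hP a.toNat (by omega)
    by_cases hpp : a.toNat.Prime
    · have hne : (pvBsA Pmax (Pmax.toNat.sqrt - 1)).getD a.toNat 0 ≠ 0 := hch.mpr hpp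
      simp only [List.getD_eq_getElem?_getD] at hne
      simp [hne, hpp]
    · have hx0 : (pvBsA Pmax (Pmax.toNat.sqrt - 1)).getD a.toNat 0 = 0 := by
        by_contra h
        exact hpp (hch.mp h)
      simp only [List.getD_eq_getElem?_getD] at hx0
      simp [hx0, hpp]
  have hQB : List.filter (fun p =>
        decide (PySem.List.pyGetD (pvCompB Pmax (Pmax.toNat - 1)) p false = false ∧
          PySem.Int.mod (-16 * (4 * A * A * A + 27 * B * B)) p ≠ 0))
      (PySem.List.pyRange 3 (Pmax + 1) 1)
      = List.filter (fun a =>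
        decide (a.toNat.Prime ∧
          PySem.Int.mod (-16 * (4 * A * A * A + 27 * B * B)) a ≠ 0))
      (PySem.List.pyRange 3 (Pmax + 1) 1) := by
    apply List.filter_congr
    intro a ha
    rw [PySem.List.mem_pyRange_one] at ha
    rw [pvGetD_toNat _ _ _ (by omega)]
    have hch := pvCompB_prime Pmax hP a.toNat (by omega) (by omega)
    by_cases hpp : a.toNat.Prime
    · have hf : (pvCompB Pmax (Pmax.toNat - 1)).getD a.toNat false = false := hch.mpr hpp
      simp only [List.getD_eq_getElem?_getD] at hf
      simp [hf, hpp]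
    · have ht : (pvCompB Pmax (Pmax.toNat - 1)).getD a.toNat false = true := by
        rcases Bool.eq_false_or_eq_true ((pvCompB Pmax (Pmax.toNat - 1)).getD a.toNat false)
          with hb | hb
        · exact hb
        · exact absurd (hch.mp hb) hpp
      simp only [List.getD_eq_getElem?_getD] at ht
      simp [ht, hpp]
  have hlists : List.filter (fun a =>
        decide (a ≠ 2 ∧ a.toNat.Prime ∧
          PySem.Int.mod (-16 * (4 * A * A * A + 27 * B * B)) a ≠ 0))
      (PySem.List.pyRange 0 (Pmax + 1) 1)
      = List.filter (fun a =>
        decide (a.toNat.Prime ∧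
          PySem.Int.mod (-16 * (4 * A * A * A + 27 * B * B)) a ≠ 0))
      (PySem.List.pyRange 3 (Pmax + 1) 1) := by
    by_cases hle : Pmax ≤ 1
    · have hB0 : PySem.List.pyRange 3 (Pmax + 1) 1 = [] :=
        PySem.List.pyRange_one_eq_nil (by omega)
      rw [hB0, List.filter_nil, List.filter_eq_nil_iff]
      intro a ha
      rw [PySem.List.mem_pyRange_one] at ha
      intro hq
      have hdec := of_decide_eq_true hq
      have h2 := hdec.2.1.two_le
      omega
    · rw [PySem.List.pyRange_one_append 0 3 (Pmax+1) (by omega) (by omega), List.filter_append]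
      have h012 : PySem.List.pyRange 0 3 1 = [0, 1, 2] := by decide
      rw [h012]
      have hhead : List.filter (fun a =>
          decide (a ≠ 2 ∧ a.toNat.Prime ∧
            PySem.Int.mod (-16 * (4 * A * A * A + 27 * B * B)) a ≠ 0)) [0, 1, 2] = [] := by
        simp [List.filter, Nat.not_prime_zero, Nat.not_prime_one]
      rw [hhead, List.nil_append]
      apply List.filter_congr
      intro a ha
      rw [PySem.List.mem_pyRange_one] at ha
      have hne2 : a ≠ 2 := by omega
      simp [hne2]
  rw [hQA, hlists, ← hQB]
  refine congrArg PySem.Dict.items ?_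
  apply PySem.List.foldl_congr_mem
  intro acc p hp
  rw [List.mem_filter] at hp
  obtain ⟨hpr, hcond⟩ := hp
  rw [PySem.List.mem_pyRange_one] at hpr
  have hc := of_decide_eq_true hcond
  have hprime : p.toNat.Prime := by
    have hch := pvCompB_prime Pmax hP p.toNat (by omega) (by omega)
    apply hch.mp
    rw [← pvGetD_toNat _ _ _ (by omega : (0:ℤ) ≤ p)]
    exact hc.1
  rw [value_eq p A B (by omega) hprime]
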